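-- pv_equiv track=rewrite | github.com/kuntito/LeetcodeGrind | grind__active/145 (minimum number of flips to make binary string alternating)/145a.py | get_right_arr
-- ===== SOURCE A (Python) =====
-- def get_right_arr(chars):
--     dim = len(chars)
--     uno = 0
--     right_arr = []
--
--     for idx in range(dim-1, -1, -1):
--         ch = chars[idx]
--         if idx % 2:
--             if ch == '0':
--                 uno += 1
--         else:
--             if ch == '1':
--                 uno += 1
--
--         dos = dim - idx - uno
--         right_arr.append((uno, dos))
--
--     return right_arr
-- ===== SOURCE B (Python) =====
-- def get_right_arr(chars):
--     # Build the sorted list of offending positions once, then answer each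
--     # suffix query with a binary search (count of positions >= idx).
--     dim = len(chars)
--     pos = [i for i, c in enumerate(chars) if c == ('1' if i % 2 == 0 else '0')]
--     total = len(pos)
--     right_arr = []
--     for idx in range(dim - 1, -1, -1):
--         lo, hi = 0, total
--         while lo < hi:
--             mid = (lo + hi) // 2
--             if pos[mid] < idx:
--                 lo = mid + 1
--             else:
--                 hi = mid
--         uno = total - lo
--         right_arr.append((uno, dim - idx - uno))
--     return right_arr
-- ===== Notes on version B (the rewrite author's own statement) =====
-- stated objective: alternative
-- what changed: A's fused reverse scan with a running flip counter is replaced by building the sorted list of offending positions once and answering each suffix with a hand-written binary search (uno = total offending positions minus the count of those below idx); the running accumulator disappears entirely.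
import Mathlib
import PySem

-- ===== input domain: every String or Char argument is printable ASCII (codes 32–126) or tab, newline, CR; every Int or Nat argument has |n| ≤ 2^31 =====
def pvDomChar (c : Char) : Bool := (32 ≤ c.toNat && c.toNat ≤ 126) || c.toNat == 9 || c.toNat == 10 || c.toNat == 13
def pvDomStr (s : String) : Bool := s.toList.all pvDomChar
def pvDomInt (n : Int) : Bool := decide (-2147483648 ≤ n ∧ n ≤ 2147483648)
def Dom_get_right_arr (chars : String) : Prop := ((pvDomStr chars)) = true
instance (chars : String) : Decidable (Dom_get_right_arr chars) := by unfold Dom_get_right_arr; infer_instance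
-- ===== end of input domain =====

-- B drops A's running flip counter: it indexes the offending positions once and answers each suffix by binary search; objective: alternative algorithm, similar cost.

-- ===== PORT A =====
def get_right_arr (chars : String) : List (Int × Int) :=
  let l := chars.toList
  let dim : Int := l.length
  ((PySem.List.pyRange (dim - 1) (-1) (-1)).foldl
    (fun (st : Int × List (Int × Int)) idx =>
      -- idx comes from range(dim-1, -1, -1), always in range: chars[idx] never raises
      let ch := PySem.List.pyGetD l idx ' '
      let uno := if PySem.Int.mod idx 2 ≠ 0 then (if ch = '0' then st.1 + 1 else st.1)
                 else (if ch = '1' then st.1 + 1 else st.1)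
      (uno, st.2 ++ [(uno, dim - idx - uno)]))
    (0, [])).2

-- ===== PORT B =====
-- B's inner 'while lo < hi' binary-search loop, as structural recursion on hi - lo.
-- pos[mid] never raises: 0 ≤ lo ≤ mid < hi ≤ len(pos) throughout.
def pvBisect (pos : List Int) (idx : Int) (lo hi : Int) : Int :=
  if h : lo < hi then
    let mid := PySem.Int.floordiv (lo + hi) 2
    if PySem.List.pyGetD pos mid 0 < idx then pvBisect pos idx (mid + 1) hi
    else pvBisect pos idx lo mid
  else lo
termination_by (hi - lo).toNat
decreasing_by
  · have h1 : lo ≤ PySem.Int.floordiv (lo + hi) 2 := by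
      rw [PySem.Int.le_floordiv_iff_mul_le (by omega : (0:Int) < 2)]; omega
    omega
  · have h2 : PySem.Int.floordiv (lo + hi) 2 < hi := by
      rw [PySem.Int.floordiv_lt_iff_lt_mul (by omega : (0:Int) < 2)]; omega
    have h1 : lo ≤ PySem.Int.floordiv (lo + hi) 2 := by
      rw [PySem.Int.le_floordiv_iff_mul_le (by omega : (0:Int) < 2)]; omega
    omega

def get_right_arr_alt (chars : String) : List (Int × Int) :=
  let l := chars.toList
  let dim : Int := l.length
  let pos : List Int := ((PySem.List.enumerate l 0).filter
      (fun ic => ic.2 == (if PySem.Int.mod ic.1 2 = 0 then '1' else '0'))).map (·.1)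
  let total : Int := pos.length
  (PySem.List.pyRange (dim - 1) (-1) (-1)).foldl
    (fun acc idx =>
      let lo := pvBisect pos idx 0 total
      let uno := total - lo
      acc ++ [(uno, dim - idx - uno)]) []

-- ===== PRECONDITION & SPEC =====
def Spec_get_right_arr (chars : String) (out : List (Int × Int)) : Prop := out = get_right_arr_alt chars
instance (chars : String) (out : List (Int × Int)) : Decidable (Spec_get_right_arr chars out) := by unfold Spec_get_right_arr; infer_instance

-- ===== CLAIM (what is proved, stated in full; the proofs are below) =====
def Claim_equal_get_right_arr : Prop := ∀ (chars : String), Dom_get_right_arr chars → Spec_get_right_arr chars (get_right_arr chars)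

-- ===== LEMMAS AND PROOFS =====

-- B's classification predicate and position index
def pvQ (ic : Int × Char) : Bool := ic.2 == (if PySem.Int.mod ic.1 2 = 0 then '1' else '0')

def pvPos (l : List Char) : List Int := ((PySem.List.enumerate l 0).filter pvQ).map (·.1)

-- the shared abstract value: number of offending positions ≥ idx
def pvCntGe (l : List Char) (idx : Int) : Int := ((pvPos l).countP (fun p => decide (idx ≤ p)) : Int)

-- if P holds exactly on the first k elements, countP = k
theorem pvCount_of_split {α : Type} (P : α → Bool) (l : List α) (k : Nat) (hk : k ≤ l.length)
    (h : ∀ m (hm : m < l.length), P l[m] = decide (m < k)) :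
    l.countP P = k := by
  induction l generalizing k with
  | nil => simp at hk; simpa [hk]
  | cons x xs ih =>
    cases k with
    | zero =>
      have hx := h 0 (by simp)
      simp only [List.getElem_cons_zero, decide_eq_false_iff_not] at hx
      rw [List.countP_cons_of_neg (by simp [hx])]
      apply List.countP_eq_zero.mpr
      intro a ha
      obtain ⟨m, hm, rfl⟩ := List.mem_iff_getElem.mp ha
      have := h (m + 1) (by simpa using Nat.succ_lt_succ hm)
      simpa using this
    | succ k' =>
      have hx := h 0 (by simp)
      simp only [List.getElem_cons_zero] at hx
      rw [List.countP_cons_of_pos (by simp [hx])]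
      rw [ih k' (by simpa using hk) (fun m hm => by
        have := h (m + 1) (by simpa using Nat.succ_lt_succ hm)
        simpa using this)]

theorem pvPos_pairwise (l : List Char) : (pvPos l).Pairwise (· < ·) := by
  unfold pvPos
  rw [List.pairwise_map]
  exact (PySem.List.pairwise_lt_enumerate l 0).filter pvQ

-- binary-search correctness under the loop invariants
theorem pvBisect_count (pos : List Int) (idx : Int) (hp : pos.Pairwise (· < ·)) :
    ∀ (n lo hi : Nat), hi - lo = n → lo ≤ hi → hi ≤ pos.length →
    (∀ m (hm : m < pos.length), m < lo → pos[m] < idx) →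
    (∀ m (hm : m < pos.length), hi ≤ m → ¬ pos[m] < idx) →
    pvBisect pos idx (lo : Int) (hi : Int) = (pos.countP (fun p => decide (p < idx)) : Int) := by
  have hmono := List.pairwise_iff_getElem.mp hp
  intro n
  induction n using Nat.strong_induction_on with
  | _ n ih =>
    intro lo hi hn hle hhi Hlo Hhi
    rw [pvBisect]
    by_cases hlt : (lo : Int) < (hi : Int)
    · rw [dif_pos hlt]
      have hmid : PySem.Int.floordiv ((lo : Int) + (hi : Int)) 2 = (((lo + hi) / 2 : Nat) : Int) := by
        rw [show ((lo : Int) + (hi : Int)) = (((lo + hi : Nat)) : Int) by push_cast; ring]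
        exact_mod_cast PySem.Int.floordiv_natCast (lo + hi) 2
      set midn := (lo + hi) / 2 with hmidn
      have hlo_mid : lo ≤ midn := by omega
      have hmid_hi : midn < hi := by omega
      have hmlen : midn < pos.length := by omega
      have hget : PySem.List.pyGetD pos (((midn : Nat)) : Int) 0 = pos[midn] := by
        rw [PySem.List.pyGetD_natCast]
        exact List.getD_eq_getElem pos 0 hmlen
      simp only [hmid, hget]
      by_cases hb : pos[midn] < idx
      · rw [if_pos hb]
        rw [show (((midn : Nat)) : Int) + 1 = (((midn + 1 : Nat)) : Int) by push_cast; ring]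
        refine ih (hi - (midn + 1)) (by omega) (midn + 1) hi rfl (by omega) hhi ?_ Hhi
        intro m hm hmlt
        rcases Nat.lt_or_ge m midn with hc | hc
        · exact lt_trans (hmono m midn hm hmlen hc) hb
        · have : m = midn := by omega
          subst this; exact hb
      · rw [if_neg hb]
        refine ih (midn - lo) (by omega) lo midn rfl (by omega) (by omega) Hlo ?_
        intro m hm hge
        rcases Nat.lt_or_ge midn m with hc | hc
        · intro habs
          exact hb (lt_trans (hmono midn m hmlen hm hc) habs)
        · have : m = midn := by omega
          subst this; exact hb
    · rw [dif_neg hlt]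
      have heq : lo = hi := by omega
      subst heq
      rw [pvCount_of_split (fun p => decide (p < idx)) pos lo hhi]
      intro m hm
      by_cases hc : m < lo
      · simp [Hlo m hm hc, hc]
      · simp [Hhi m hm (by omega), hc]

-- countP splits at idx: (≥ idx) = (≥ idx+1) + (= idx)
theorem pvCnt_split (idx : Int) (l : List Int) :
    l.countP (fun p => decide (idx ≤ p))
      = l.countP (fun p => decide (idx + 1 ≤ p)) + l.countP (fun p => decide (p = idx)) := by
  induction l with
  | nil => simp
  | cons x xs ih =>
    simp only [List.countP_cons, ih]
    by_cases h1 : idx ≤ x <;> by_cases h2 : idx + 1 ≤ x <;> by_cases h3 : x = idx <;>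
      simp [h1, h2, h3] <;> omega

-- in enumerate, exactly one pair has first component s + m
theorem pvEnumCount (l : List Char) : ∀ (s : Int) (m : Nat) (hm : m < l.length),
    (PySem.List.enumerate l s).countP (fun ic => decide (ic.1 = s + (m : Int)) && pvQ ic)
      = if pvQ (s + (m : Int), l[m]) then 1 else 0 := by
  induction l with
  | nil => intro s m hm; simp at hm
  | cons x xs ih =>
    intro s m hm
    rw [PySem.List.enumerate_cons, List.countP_cons]
    cases m with
    | zero =>
      have htail : (PySem.List.enumerate xs (s + 1)).countP
          (fun ic => decide (ic.1 = s + ((0 : Nat) : Int)) && pvQ ic) = 0 := by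
        apply List.countP_eq_zero.mpr
        intro a ha
        obtain ⟨k, hk, rfl⟩ := (PySem.List.mem_enumerate_iff _ _ _).mp ha
        simp only [Bool.and_eq_true, decide_eq_true_eq]
        rintro ⟨h, -⟩
        omega
      rw [htail]
      simp
    | succ m' =>
      have hhead : (decide ((s, x).1 = s + ((m' + 1 : Nat) : Int)) && pvQ (s, x)) = false := by
        simp only [Bool.and_eq_false_iff, decide_eq_false_iff_not]
        left; intro h; omega
      rw [hhead]
      have := ih (s + 1) m' (by simpa using Nat.lt_of_succ_lt_succ hm)
      rw [show s + ((m' + 1 : Nat) : Int) = (s + 1) + ((m' : Nat) : Int) by push_cast; ring]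
      simpa using this

-- count of offending positions equal to m is the flip indicator at m
theorem pvPosCountEq (l : List Char) (m : Nat) (hm : m < l.length) :
    (pvPos l).countP (fun p => decide (p = (m : Int)))
      = if pvQ ((m : Int), l[m]) then 1 else 0 := by
  unfold pvPos
  rw [List.countP_map, List.countP_filter]
  have := pvEnumCount l 0 m hm
  rw [show (0 : Int) + (m : Int) = (m : Int) by ring] at this
  rw [← this]
  apply List.countP_congr
  intro a _
  simp [Function.comp]

-- A's branch step computes pvCntGe at m from pvCntGe at m+1
theorem pvStep (l : List Char) (m : Nat) (hm : m < l.length) :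
    (if PySem.Int.mod (m : Int) 2 ≠ 0 then (if l[m] = '0' then pvCntGe l ((m : Int) + 1) + 1 else pvCntGe l ((m : Int) + 1))
     else (if l[m] = '1' then pvCntGe l ((m : Int) + 1) + 1 else pvCntGe l ((m : Int) + 1)))
      = pvCntGe l (m : Int) := by
  have hsplit := pvCnt_split (m : Int) (pvPos l)
  have hcount := pvPosCountEq l m hm
  have hmod : PySem.Int.mod (m : Int) 2 = ((m % 2 : Nat) : Int) := PySem.Int.mod_natCast m 2
  unfold pvCntGe
  rw [hsplit, hcount]
  unfold pvQ
  rcases Nat.even_or_odd m with he | ho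
  · have h2 : m % 2 = 0 := Nat.even_iff.mp he
    simp only [hmod, h2]
    by_cases hc : l[m] = '1' <;> simp [hc] <;> omega
  · have h2 : m % 2 = 1 := Nat.odd_iff.mp ho
    simp only [hmod, h2]
    by_cases hc : l[m] = '0' <;> simp [hc] <;> omega

-- A's loop, characterised: starting with the count for the unprocessed suffix,
-- it appends (pvCntGe idx, …) for each idx of the countdown range
theorem pvA_loop (l : List Char) : ∀ (m : Nat), m ≤ l.length → ∀ (acc : List (Int × Int)),
    ((PySem.List.pyRange ((m : Int) - 1) (-1) (-1)).foldl
      (fun (st : Int × List (Int × Int)) idx =>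
        let ch := PySem.List.pyGetD l idx ' '
        let uno := if PySem.Int.mod idx 2 ≠ 0 then (if ch = '0' then st.1 + 1 else st.1)
                   else (if ch = '1' then st.1 + 1 else st.1)
        (uno, st.2 ++ [(uno, (l.length : Int) - idx - uno)]))
      (pvCntGe l (m : Int), acc)).2
      = acc ++ (PySem.List.pyRange ((m : Int) - 1) (-1) (-1)).map
          (fun idx => (pvCntGe l idx, (l.length : Int) - idx - pvCntGe l idx)) := by
  intro m
  induction m with
  | zero =>
    intro _ acc
    rw [PySem.List.pyRange_neg_one_eq_nil (by omega)]
    simp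
  | succ m ih =>
    intro hm acc
    have hmn : m < l.length := by omega
    rw [show (((m + 1 : ℕ) : Int) - 1) = (m : Int) by push_cast; ring]
    rw [PySem.List.pyRange_neg_one_cons (by omega : (-1 : Int) < (m : Int))]
    rw [List.foldl_cons, List.map_cons]
    simp only
    have hget : PySem.List.pyGetD l ((m : Nat) : Int) ' ' = l[m] := by
      rw [PySem.List.pyGetD_natCast]
      exact List.getD_eq_getElem l ' ' hmn
    rw [hget]
    have hstep := pvStep l m hmn
    rw [show ((m : Int) + 1) = (((m + 1 : ℕ)) : Int) by push_cast; ring] at hstep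
    rw [hstep]
    rw [ih (by omega)]
    simp [List.append_assoc]

-- B's per-index value is pvCntGe
theorem pvB_point (l : List Char) (idx : Int) :
    ((pvPos l).length : Int) - pvBisect (pvPos l) idx 0 ((pvPos l).length : Int) = pvCntGe l idx := by
  have h := pvBisect_count (pvPos l) idx (pvPos_pairwise l) ((pvPos l).length) 0 ((pvPos l).length)
    rfl (by omega) le_rfl (by intro m hm hlt; omega) (by intro m hm hge; omega)
  rw [show ((0 : Nat) : Int) = (0 : Int) by norm_num] at h
  rw [h]
  unfold pvCntGe
  have hlen := List.length_eq_countP_add_countP (fun p => decide (p < idx)) (l := pvPos l)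
  have hc : (pvPos l).countP (fun a => decide (¬ decide (a < idx) = true))
      = (pvPos l).countP (fun p => decide (idx ≤ p)) := by
    apply List.countP_congr
    intro a _
    simp [not_lt]
  rw [hc] at hlen
  omega

-- ===== VERDICT (by name: the statement is the Claim_ definition above) =====
theorem get_right_arr_spec : Claim_equal_get_right_arr := by
  intro chars _
  unfold Spec_get_right_arr get_right_arr get_right_arr_alt
  simp only
  set l := chars.toList with hl
  have hA := pvA_loop l l.length le_rfl []
  have hz : pvCntGe l ((l.length : Nat) : Int) = 0 := by
    unfold pvCntGe
    have : (pvPos l).countP (fun p => decide (((l.length : Nat) : Int) ≤ p)) = 0 := by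
      apply List.countP_eq_zero.mpr
      intro a ha
      unfold pvPos at ha
      obtain ⟨ic, hic, rfl⟩ := List.mem_map.mp ha
      obtain ⟨k, hk, rfl⟩ := (PySem.List.mem_enumerate_iff _ _ _).mp (List.mem_of_mem_filter hic)
      simp only [decide_eq_true_eq]
      omega
    simp [this]
  rw [show ((0 : Int), ([] : List (Int × Int))) = (pvCntGe l ((l.length : Nat) : Int), ([] : List (Int × Int))) by rw [hz]]
  rw [hA]
  rw [PySem.List.foldl_append_singleton_eq_map]
  rw [List.nil_append, List.nil_append]
  apply List.map_congr_left
  intro idx _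
  have := pvB_point l idx
  unfold pvPos pvQ at this
  rw [this]
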